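-- pv_equiv track=rewrite | github.com/Auriukux/JS24.1T-AurelijusTest | Vytauto (Python)/uzduotis salygos sakinys IF/3 IF užduotis/9S.py | rearrange_number
-- ===== SOURCE A (Python) =====
-- def rearrange_number(num):
--     num_str = str(num)
--     if len(num_str) != 4:
--         raise ValueError("Skaičius turi būti keturženklis")
--
--     digits = sorted(num_str, reverse=True)
--     even = ''.join(sorted([d for d in digits if int(d) % 2 == 0]))
--     odd = ''.join(sorted([d for d in digits if int(d) % 2 != 0]))
--
--     return even + odd
-- ===== SOURCE B (Python) =====
-- def rearrange_number(num):
--     num_str = str(num)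
--     if len(num_str) != 4:
--         raise ValueError("Skaičius turi būti keturženklis")
--
--     counts = {}
--     for d in num_str:
--         v = int(d)
--         counts[v] = counts.get(v, 0) + 1
--
--     res = []
--     for v in (0, 2, 4, 6, 8):
--         res.append(str(v) * counts.get(v, 0))
--     for v in (1, 3, 5, 7, 9):
--         res.append(str(v) * counts.get(v, 0))
--     return ''.join(res)
-- ===== Notes on version B (the rewrite author's own statement) =====
-- stated objective: alternative
-- what changed: Replaces the two filter-then-sort comprehensions (after a redundant descending pre-sort) with a single counting pass into a digit-frequency table, then emits the even digit values in increasing order followed by the odd ones, each repeated its counted number of times (a counting sort).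
import Mathlib
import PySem

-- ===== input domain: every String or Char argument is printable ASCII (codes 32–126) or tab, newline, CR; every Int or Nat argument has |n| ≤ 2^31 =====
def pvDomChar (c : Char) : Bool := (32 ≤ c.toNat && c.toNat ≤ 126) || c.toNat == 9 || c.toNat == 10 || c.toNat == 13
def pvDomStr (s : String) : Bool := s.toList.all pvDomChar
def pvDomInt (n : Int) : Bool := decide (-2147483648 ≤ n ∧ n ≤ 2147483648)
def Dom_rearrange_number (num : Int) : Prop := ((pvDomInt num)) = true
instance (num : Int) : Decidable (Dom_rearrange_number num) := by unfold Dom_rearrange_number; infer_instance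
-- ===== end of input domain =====

-- B replaces A's two filter-and-sort passes by one counting pass into a frequency dict,
-- emitting each even then odd digit value the counted number of times (alternative decomposition).

-- ===== PORT A =====
def rearrange_number (num : Int) : String :=
  let numStr := PySem.Int.toChars num
  if numStr.length ≠ 4 then ""   -- Python raises ValueError here; excluded by Pre_
  else
    let digits := PySem.List.sorted numStr (fun d => d) true
    let even := PySem.List.sorted
      (digits.filter (fun d => PySem.Int.mod ((PySem.Int.ofChars? [d]).getD 0) 2 == 0))
      (fun d => d) false
    let odd := PySem.List.sorted
      (digits.filter (fun d => !(PySem.Int.mod ((PySem.Int.ofChars? [d]).getD 0) 2 == 0)))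
      (fun d => d) false
    String.mk (even ++ odd)

-- ===== PORT B =====
def rearrange_number_alt (num : Int) : String :=
  let numStr := PySem.Int.toChars num
  if numStr.length ≠ 4 then ""   -- Python raises ValueError here; excluded by Pre_
  else
    let counts := numStr.foldl
      (fun (dd : PySem.Dict Int Int) ch =>
        let v := (PySem.Int.ofChars? [ch]).getD 0
        dd.insert v (dd.getD v 0 + 1))
      PySem.Dict.empty
    let res := ([0, 2, 4, 6, 8] : List Int).foldl
      (fun acc v => acc ++ PySem.List.pyRepeat (PySem.Int.toChars v) (counts.getD v 0)) []
    let res := ([1, 3, 5, 7, 9] : List Int).foldl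
      (fun acc v => acc ++ PySem.List.pyRepeat (PySem.Int.toChars v) (counts.getD v 0)) res
    String.mk res

-- ===== PRECONDITION & SPEC =====
-- Pre_ excludes exactly the inputs on which A raises ValueError: num outside 1000..9999
-- (a decimal string of the wrong length, or a negative number whose four-character
-- string makes int(d) raise on the minus sign).
def Pre_rearrange_number (num : Int) : Prop := 1000 ≤ num ∧ num ≤ 9999
instance (num : Int) : Decidable (Pre_rearrange_number num) := by
  unfold Pre_rearrange_number; infer_instance
def pvWitness_rearrange_number : Int := (1234)

def Spec_rearrange_number (num : Int) (out : String) : Prop := out = rearrange_number_alt num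
instance (num : Int) (out : String) : Decidable (Spec_rearrange_number num out) := by
  unfold Spec_rearrange_number; infer_instance

-- ===== CLAIM (what is proved, stated in full; the proofs are below) =====
def Claim_equal_rearrange_number : Prop :=
  ∀ (num : Int), Dom_rearrange_number num → Pre_rearrange_number num →
    Spec_rearrange_number num (rearrange_number num)

-- ===== LEMMAS AND PROOFS =====

-- the ten decimal digit characters
def pvDigits : List Char := ['0', '1', '2', '3', '4', '5', '6', '7', '8', '9']

lemma pv_digitChar_mem (a : Nat) (h : a < 10) : Nat.digitChar a ∈ pvDigits := by
  interval_cases a <;> decide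

-- stepping lemmas for Nat.toDigitsCore
lemma pv_toDigitsCore_small (f n : Nat) (acc : List Char) (h : n < 10) :
    Nat.toDigitsCore 10 (f + 1) n acc = Nat.digitChar n :: acc := by
  simp [Nat.toDigitsCore, Nat.div_eq_of_lt h, Nat.mod_eq_of_lt h]

lemma pv_toDigitsCore_step (f n : Nat) (acc : List Char) (h : 10 ≤ n) :
    Nat.toDigitsCore 10 (f + 1) n acc =
      Nat.toDigitsCore 10 f (n / 10) (Nat.digitChar (n % 10) :: acc) := by
  have : n / 10 ≠ 0 := by omega
  simp [Nat.toDigitsCore, this]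

lemma pv_toDigits_four (n : Nat) (h1 : 1000 ≤ n) (h2 : n ≤ 9999) :
    Nat.toDigits 10 n =
      [Nat.digitChar (n / 1000), Nat.digitChar (n / 100 % 10),
       Nat.digitChar (n / 10 % 10), Nat.digitChar (n % 10)] := by
  obtain ⟨f, hf⟩ : ∃ f, n + 1 = (f + 1) + 1 + 1 + 1 := ⟨n - 3, by omega⟩
  unfold Nat.toDigits
  rw [hf, pv_toDigitsCore_step _ _ _ (by omega),
      pv_toDigitsCore_step _ _ _ (by omega),
      pv_toDigitsCore_step _ _ _ (by omega),
      pv_toDigitsCore_small _ _ _ (by omega),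
      show n / 10 / 10 = n / 100 by omega,
      show n / 100 / 10 = n / 1000 by omega]

-- flatMap of replicates over an ≤-sorted list is ≤-pairwise
lemma pv_pairwise_flatMap (cs : List Char) (f : Char → Nat) (h : cs.Pairwise (· ≤ ·)) :
    (cs.flatMap fun c => List.replicate (f c) c).Pairwise (· ≤ ·) := by
  induction cs with
  | nil => simp
  | cons c t ih =>
    rw [List.pairwise_cons] at h
    rw [List.flatMap_cons, List.pairwise_append]
    refine ⟨List.pairwise_replicate.mpr (Or.inr le_rfl), ih h.2, ?_⟩
    intro x hx y hy
    rw [List.eq_of_mem_replicate hx]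
    rw [List.mem_flatMap] at hy
    obtain ⟨c', hc', hy⟩ := hy
    rw [List.eq_of_mem_replicate hy]
    exact h.1 c' hc'

lemma pv_count_flatMap (cs : List Char) (hnd : cs.Pairwise (· < ·)) (l : List Char) (a : Char) :
    (cs.flatMap fun c => List.replicate (l.count c) c).count a =
      if a ∈ cs then l.count a else 0 := by
  induction cs with
  | nil => simp
  | cons c t ih =>
    rw [List.pairwise_cons] at hnd
    rw [List.flatMap_cons, List.count_append, ih hnd.2, List.count_replicate]
    by_cases hac : a = c
    · subst hac
      have : a ∉ t := fun hm => absurd (hnd.1 a hm) (lt_irrefl a)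
      simp [this]
    · simp [hac, Ne.symm hac, List.mem_cons]

-- counting-sort characterisation of sorted-filter
lemma pv_sort_filter_eq (l : List Char) (hl : ∀ c ∈ l, c ∈ pvDigits)
    (p : Char → Bool) (es : List Char) (hes : es.Pairwise (· < ·))
    (hmem : ∀ c ∈ pvDigits, (p c = true ↔ c ∈ es)) :
    PySem.List.sorted (l.filter p) (fun d => d) false =
      es.flatMap fun c => List.replicate (l.count c) c := by
  apply PySem.List.sorted_id_eq_of_perm_of_pairwise
  · rw [List.perm_iff_count]
    intro a
    rw [pv_count_flatMap es hes l a]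
    by_cases hal : a ∈ l
    · have hd := hl a hal
      by_cases hp : p a = true
      · rw [List.count_filter hp]
        simp [(hmem a hd).mp hp]
      · have hnf : a ∉ l.filter p := by simp [List.mem_filter, hp]
        have hne : a ∉ es := fun hm => hp ((hmem a hd).mpr hm)
        rw [List.count_eq_zero.mpr hnf]
        simp [hne]
    · have h1 : a ∉ l.filter p := fun hm => hal (List.mem_of_mem_filter hm)
      have h2 : l.count a = 0 := List.count_eq_zero.mpr hal
      rw [List.count_eq_zero.mpr h1, h2]
      simp
  · exact pv_pairwise_flatMap es _ (hes.imp le_of_lt)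

lemma pv_count_map_val (l : List Char) (hl : ∀ c ∈ l, c ∈ pvDigits)
    (v : Int) (d : Char) (hv : ∀ c ∈ pvDigits, ((PySem.Int.ofChars? [c]).getD 0 = v ↔ c = d)) :
    (l.map fun ch => (PySem.Int.ofChars? [ch]).getD 0).count v = l.count d := by
  rw [List.count_eq_countP, List.count_eq_countP, List.countP_map]
  apply List.countP_congr
  intro x hx
  have h := hv x (hl x hx)
  simp only [Function.comp_apply, beq_iff_eq]
  exact ⟨fun hh => h.mp hh, fun hh => h.mpr hh⟩

-- the frequency dict built by port B counts occurrences of each digit character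
lemma pv_counts_getD (l : List Char) (hl : ∀ c ∈ l, c ∈ pvDigits)
    (v : Int) (d : Char) (hv : ∀ c ∈ pvDigits, ((PySem.Int.ofChars? [c]).getD 0 = v ↔ c = d)) :
    (l.foldl
      (fun (dd : PySem.Dict Int Int) ch =>
        dd.insert ((PySem.Int.ofChars? [ch]).getD 0)
          (dd.getD ((PySem.Int.ofChars? [ch]).getD 0) 0 + 1))
      PySem.Dict.empty).getD v 0 = (l.count d : Int) := by
  rw [show
      l.foldl
        (fun (dd : PySem.Dict Int Int) ch =>
          dd.insert ((PySem.Int.ofChars? [ch]).getD 0)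
            (dd.getD ((PySem.Int.ofChars? [ch]).getD 0) 0 + 1))
        PySem.Dict.empty
      = (l.map fun ch => (PySem.Int.ofChars? [ch]).getD 0).foldl
          (fun (dd : PySem.Dict Int Int) x => dd.insert x (dd.getD x 0 + 1))
          PySem.Dict.empty from by rw [List.foldl_map],
    PySem.Dict.getD_foldl_insert_add_one, pv_count_map_val l hl v d hv]
  simp

-- main equivalence on a 4-character all-digit list
lemma pv_main (c0 c1 c2 c3 : Char)
    (h0 : c0 ∈ pvDigits) (h1 : c1 ∈ pvDigits) (h2 : c2 ∈ pvDigits) (h3 : c3 ∈ pvDigits) :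
    String.mk
      (PySem.List.sorted
        ((PySem.List.sorted [c0, c1, c2, c3] (fun d => d) true).filter
          (fun d => PySem.Int.mod ((PySem.Int.ofChars? [d]).getD 0) 2 == 0))
        (fun d => d) false ++
       PySem.List.sorted
        ((PySem.List.sorted [c0, c1, c2, c3] (fun d => d) true).filter
          (fun d => !(PySem.Int.mod ((PySem.Int.ofChars? [d]).getD 0) 2 == 0)))
        (fun d => d) false) =
    String.mk
      (([1, 3, 5, 7, 9] : List Int).foldl
        (fun acc v => acc ++ PySem.List.pyRepeat (PySem.Int.toChars v)
          (([c0, c1, c2, c3].foldl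
            (fun (dd : PySem.Dict Int Int) ch =>
              dd.insert ((PySem.Int.ofChars? [ch]).getD 0)
                (dd.getD ((PySem.Int.ofChars? [ch]).getD 0) 0 + 1))
            PySem.Dict.empty).getD v 0))
        (([0, 2, 4, 6, 8] : List Int).foldl
          (fun acc v => acc ++ PySem.List.pyRepeat (PySem.Int.toChars v)
            (([c0, c1, c2, c3].foldl
              (fun (dd : PySem.Dict Int Int) ch =>
                dd.insert ((PySem.Int.ofChars? [ch]).getD 0)
                  (dd.getD ((PySem.Int.ofChars? [ch]).getD 0) 0 + 1))
              PySem.Dict.empty).getD v 0))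
          [])) := by
  have hl : ∀ c ∈ [c0, c1, c2, c3], c ∈ pvDigits := by
    intro c hc
    simp only [List.mem_cons, List.not_mem_nil, or_false] at hc
    rcases hc with rfl | rfl | rfl | rfl
    exacts [h0, h1, h2, h3]
  -- A side: drop the descending pre-sort, then counting-sort characterisation
  have hA1 :
      PySem.List.sorted
        ((PySem.List.sorted [c0, c1, c2, c3] (fun d => d) true).filter
          (fun d => PySem.Int.mod ((PySem.Int.ofChars? [d]).getD 0) 2 == 0))
        (fun d => d) false
      = PySem.List.sorted
          ([c0, c1, c2, c3].filter
            (fun d => PySem.Int.mod ((PySem.Int.ofChars? [d]).getD 0) 2 == 0))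
          (fun d => d) false :=
    PySem.List.sorted_eq_sorted_of_perm _ _ _ (fun _ _ hh => hh)
      ((PySem.List.sorted_perm [c0, c1, c2, c3] (fun d => d) true).filter _)
  have hA2 :
      PySem.List.sorted
        ((PySem.List.sorted [c0, c1, c2, c3] (fun d => d) true).filter
          (fun d => !(PySem.Int.mod ((PySem.Int.ofChars? [d]).getD 0) 2 == 0)))
        (fun d => d) false
      = PySem.List.sorted
          ([c0, c1, c2, c3].filter
            (fun d => !(PySem.Int.mod ((PySem.Int.ofChars? [d]).getD 0) 2 == 0)))
          (fun d => d) false :=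
    PySem.List.sorted_eq_sorted_of_perm _ _ _ (fun _ _ hh => hh)
      ((PySem.List.sorted_perm [c0, c1, c2, c3] (fun d => d) true).filter _)
  rw [hA1, hA2,
    pv_sort_filter_eq [c0, c1, c2, c3] hl _ ['0', '2', '4', '6', '8'] (by decide)
      (by intro c hc; fin_cases hc <;> decide),
    pv_sort_filter_eq [c0, c1, c2, c3] hl _ ['1', '3', '5', '7', '9'] (by decide)
      (by intro c hc; fin_cases hc <;> decide)]
  -- B side: unfold the literal folds and rewrite each dict lookup to a character count
  set K := List.foldl
      (fun (dd : PySem.Dict Int Int) ch =>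
        dd.insert ((PySem.Int.ofChars? [ch]).getD 0)
          (dd.getD ((PySem.Int.ofChars? [ch]).getD 0) 0 + 1))
      PySem.Dict.empty [c0, c1, c2, c3] with hK
  simp only [List.foldl]
  rw [hK]
  rw [pv_counts_getD [c0, c1, c2, c3] hl 0 '0' (by intro c hc; fin_cases hc <;> decide),
      pv_counts_getD [c0, c1, c2, c3] hl 1 '1' (by intro c hc; fin_cases hc <;> decide),
      pv_counts_getD [c0, c1, c2, c3] hl 2 '2' (by intro c hc; fin_cases hc <;> decide),
      pv_counts_getD [c0, c1, c2, c3] hl 3 '3' (by intro c hc; fin_cases hc <;> decide),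
      pv_counts_getD [c0, c1, c2, c3] hl 4 '4' (by intro c hc; fin_cases hc <;> decide),
      pv_counts_getD [c0, c1, c2, c3] hl 5 '5' (by intro c hc; fin_cases hc <;> decide),
      pv_counts_getD [c0, c1, c2, c3] hl 6 '6' (by intro c hc; fin_cases hc <;> decide),
      pv_counts_getD [c0, c1, c2, c3] hl 7 '7' (by intro c hc; fin_cases hc <;> decide),
      pv_counts_getD [c0, c1, c2, c3] hl 8 '8' (by intro c hc; fin_cases hc <;> decide),
      pv_counts_getD [c0, c1, c2, c3] hl 9 '9' (by intro c hc; fin_cases hc <;> decide),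
      show PySem.Int.toChars 0 = ['0'] from rfl,
      show PySem.Int.toChars 1 = ['1'] from rfl,
      show PySem.Int.toChars 2 = ['2'] from rfl,
      show PySem.Int.toChars 3 = ['3'] from rfl,
      show PySem.Int.toChars 4 = ['4'] from rfl,
      show PySem.Int.toChars 5 = ['5'] from rfl,
      show PySem.Int.toChars 6 = ['6'] from rfl,
      show PySem.Int.toChars 7 = ['7'] from rfl,
      show PySem.Int.toChars 8 = ['8'] from rfl,
      show PySem.Int.toChars 9 = ['9'] from rfl]
  simp only [PySem.List.pyRepeat_singleton, Int.toNat_natCast]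
  simp [List.flatMap_cons, List.flatMap_nil, List.append_assoc]

-- ===== VERDICT (by name: the statement is the Claim_ definition above) =====
set_option maxHeartbeats 1000000 in
theorem rearrange_number_spec : Claim_equal_rearrange_number := by
  intro num _ hpre
  obtain ⟨hp1, hp2⟩ := hpre
  unfold Spec_rearrange_number rearrange_number rearrange_number_alt
  have hL : PySem.Int.toChars num =
      [Nat.digitChar (num.toNat / 1000), Nat.digitChar (num.toNat / 100 % 10),
       Nat.digitChar (num.toNat / 10 % 10), Nat.digitChar (num.toNat % 10)] := by
    unfold PySem.Int.toChars
    rw [if_neg (by omega)]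
    exact pv_toDigits_four num.toNat (by omega) (by omega)
  simp only [hL]
  rw [if_neg (by simp), if_neg (by simp)]
  exact pv_main _ _ _ _ (pv_digitChar_mem _ (by omega)) (pv_digitChar_mem _ (by omega))
    (pv_digitChar_mem _ (by omega)) (pv_digitChar_mem _ (by omega))
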